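-- pv_equiv track=rewrite | github.com/matheusbuniotto/tiny-spec | src/spec_cli/commands/corrections.py | _suggestions
-- ===== SOURCE A (Python) =====
-- from collections import Counter
--
-- def _suggestions(rows: list[dict]) -> list[str]:
--     counts = Counter(row.get("category", "human-preference") for row in rows)
--     suggestions = []
--     if counts["missed-ac"]:
--         suggestions.append(
--             "Implementer prompt: before delivery, map every AC to code/test evidence."
--         )
--     if counts["bad-handoff"]:
--         suggestions.append(
--             "Deliver command/prompt: require exact test commands, results, and changed files."
--         )
--     if counts["weak-tests"]:
--         suggestions.append(
--             "Checks/templates: require at least one failure-path test for each feature spec."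
--         )
--     if counts["spec-unclear"]:
--         suggestions.append(
--             "Templates: make AC and Agent Context sections more explicit before approval."
--         )
--     if counts["scope-creep"]:
--         suggestions.append(
--             "Agent context: repeat Out of Scope in task packet and delivery self-review."
--         )
--     return suggestions[:5]
-- ===== SOURCE B (Python) =====
-- _TABLE = [
--     ("missed-ac",
--      "Implementer prompt: before delivery, map every AC to code/test evidence."),
--     ("bad-handoff",
--      "Deliver command/prompt: require exact test commands, results, and changed files."),
--     ("weak-tests",
--      "Checks/templates: require at least one failure-path test for each feature spec."),
--     ("spec-unclear",
--      "Templates: make AC and Agent Context sections more explicit before approval."),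
--     ("scope-creep",
--      "Agent context: repeat Out of Scope in task packet and delivery self-review."),
-- ]
--
-- def _suggestions(rows: list[dict]) -> list[str]:
--     # No Counter/set is built at all: for each table entry, scan the rows
--     # directly with early exit for a row of that category.
--     def present(cat):
--         return any(row.get("category", "human-preference") == cat for row in rows)
--     return [msg for cat, msg in _TABLE if present(cat)][:5]
-- ===== Notes on version B (the rewrite author's own statement) =====
-- stated objective: alternative
-- what changed: A builds a Counter of all categories in one pass and then tests five keys; B builds no intermediate structure at all: it is table-driven, scanning the rows once per table entry with an early-exit any().
import Mathlib
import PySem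

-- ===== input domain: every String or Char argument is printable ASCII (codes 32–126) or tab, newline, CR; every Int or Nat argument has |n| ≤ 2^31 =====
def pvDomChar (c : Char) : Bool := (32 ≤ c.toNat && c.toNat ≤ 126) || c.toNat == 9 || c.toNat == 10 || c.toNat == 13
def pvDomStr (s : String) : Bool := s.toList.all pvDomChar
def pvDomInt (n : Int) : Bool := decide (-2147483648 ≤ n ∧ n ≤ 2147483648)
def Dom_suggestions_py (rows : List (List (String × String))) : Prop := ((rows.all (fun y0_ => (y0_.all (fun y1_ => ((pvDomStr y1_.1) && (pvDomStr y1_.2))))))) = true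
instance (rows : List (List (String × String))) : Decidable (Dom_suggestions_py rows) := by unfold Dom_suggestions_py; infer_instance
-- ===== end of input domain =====

-- B replaces A's Counter-then-five-lookups by a table-driven comprehension that scans
-- the rows directly per table entry, building no intermediate count/set (objective: alternative).


-- ===== PORT A =====
-- row.get("category", "human-preference")
def pvCat (row : List (String × String)) : String :=
  (PySem.Dict.mk row).getD "category" "human-preference"

def suggestions_py (rows : List (List (String × String))) : List String :=
  let counts := PySem.Dict.counter (rows.map pvCat)
  let suggestions : List String := []
  let suggestions := if counts.getD "missed-ac" 0 ≠ 0 then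
    suggestions ++ ["Implementer prompt: before delivery, map every AC to code/test evidence."]
    else suggestions
  let suggestions := if counts.getD "bad-handoff" 0 ≠ 0 then
    suggestions ++ ["Deliver command/prompt: require exact test commands, results, and changed files."]
    else suggestions
  let suggestions := if counts.getD "weak-tests" 0 ≠ 0 then
    suggestions ++ ["Checks/templates: require at least one failure-path test for each feature spec."]
    else suggestions
  let suggestions := if counts.getD "spec-unclear" 0 ≠ 0 then
    suggestions ++ ["Templates: make AC and Agent Context sections more explicit before approval."]
    else suggestions
  let suggestions := if counts.getD "scope-creep" 0 ≠ 0 then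
    suggestions ++ ["Agent context: repeat Out of Scope in task packet and delivery self-review."]
    else suggestions
  -- suggestions[:5] with a nonnegative literal bound is List.take 5
  suggestions.take 5

-- ===== PORT B =====
def pvTable : List (String × String) :=
  [("missed-ac", "Implementer prompt: before delivery, map every AC to code/test evidence."),
   ("bad-handoff", "Deliver command/prompt: require exact test commands, results, and changed files."),
   ("weak-tests", "Checks/templates: require at least one failure-path test for each feature spec."),
   ("spec-unclear", "Templates: make AC and Agent Context sections more explicit before approval."),
   ("scope-creep", "Agent context: repeat Out of Scope in task packet and delivery self-review.")]

-- any(row.get("category", "human-preference") == cat for row in rows)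
def pvPresent (rows : List (List (String × String))) (cat : String) : Bool :=
  rows.any (fun row => pvCat row == cat)

def suggestions_py_alt (rows : List (List (String × String))) : List String :=
  -- the comprehension [msg for cat, msg in _TABLE if present(cat)]
  ((pvTable.filter (fun p => pvPresent rows p.1)).map Prod.snd).take 5

-- ===== PRECONDITION & SPEC =====
def Spec_suggestions_py (rows : List (List (String × String))) (out : List String) : Prop := out = suggestions_py_alt rows
instance (rows : List (List (String × String))) (out : List String) : Decidable (Spec_suggestions_py rows out) := by unfold Spec_suggestions_py; infer_instance

-- ===== CLAIM (what is proved, stated in full; the proofs are below) =====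
def Claim_equal_suggestions_py : Prop := ∀ (rows : List (List (String × String))), Dom_suggestions_py rows → Spec_suggestions_py rows (suggestions_py rows)

-- ===== LEMMAS AND PROOFS =====
-- A's Counter-truthiness test coincides with B's direct early-exit scan of the rows
lemma counter_ne_zero_iff_present (rows : List (List (String × String))) (c : String) :
    (PySem.Dict.counter (rows.map pvCat)).getD c 0 ≠ 0 ↔ pvPresent rows c = true := by
  rw [PySem.Dict.getD_counter, pvPresent]
  simp [List.count_eq_zero, List.any_eq_true, List.mem_map, beq_iff_eq]

-- ===== VERDICT (by name: the statement is the Claim_ definition above) =====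
theorem suggestions_py_spec : Claim_equal_suggestions_py := by
  intro rows _
  unfold Spec_suggestions_py suggestions_py suggestions_py_alt pvTable
  have key : ∀ c : String, (¬ (PySem.Dict.counter (rows.map pvCat)).getD c 0 = 0) =
      (pvPresent rows c = true) :=
    fun c => propext (counter_ne_zero_iff_present rows c)
  simp only [key]
  cases h1 : pvPresent rows "missed-ac" <;>
    cases h2 : pvPresent rows "bad-handoff" <;>
      cases h3 : pvPresent rows "weak-tests" <;>
        cases h4 : pvPresent rows "spec-unclear" <;>
          cases h5 : pvPresent rows "scope-creep" <;>
            simp [h1, h2, h3, h4, h5, List.filter]
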